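-- pv_equiv track=rewrite | github.com/MiJey/Algorithms | baekjoon/16234_인구이동.py | check_border
-- ===== SOURCE A (Python) =====
-- def check_border(land, checked, updated, l, r, before, total, count, i, j):
--     if i < 0 or i >= len(land) or j < 0 or j >= len(land[0]) or checked[i][j] or updated[i][j]:
--         return total, 0
--
--     if not (l <= abs(before - land[i][j]) <= r):
--         return total, 0
--
--     checked[i][j] = True
--
--     t4, c4 = check_border(land, checked, updated, l, r, land[i][j], total, count + 1, i, j + 1)
--     t2, c2 = check_border(land, checked, updated, l, r, land[i][j], total, count + 1, i + 1, j)
--     t3, c3 = check_border(land, checked, updated, l, r, land[i][j], total, count + 1, i, j - 1)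
--     t1, c1 = check_border(land, checked, updated, l, r, land[i][j], total, count + 1, i - 1, j)
--
--     return (total + land[i][j] + t1 + t2 + t3 + t4), c1 + c2 + c3 + c4 + 1
-- ===== SOURCE B (Python) =====
-- # Iterative flood fill with an explicit stack instead of A's 4-way recursion.
-- # Mutates `checked` in place exactly like A (marks the same cells).
-- # Intended difference: A re-adds the caller's running `total` once per recursive
-- # call (including skipped calls), inflating the first component whenever
-- # total != 0 and the start cell is accepted; B returns total + region sum.
-- def check_border(land, checked, updated, l, r, before, total, count, i, j):
--     rows = len(land)
--     cols = len(land[0]) if land else 0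
--     s = 0
--     c = 0
--     stack = [(i, j, before)]
--     while stack:
--         ci, cj, b = stack.pop()
--         if ci < 0 or ci >= rows or cj < 0 or cj >= cols:
--             continue
--         if checked[ci][cj] or updated[ci][cj]:
--             continue
--         v = land[ci][cj]
--         if not (l <= abs(b - v) <= r):
--             continue
--         checked[ci][cj] = True
--         s += v
--         c += 1
--         stack.append((ci - 1, cj, v))
--         stack.append((ci, cj - 1, v))
--         stack.append((ci + 1, cj, v))
--         stack.append((ci, cj + 1, v))
--     return total + s, c
-- ===== Notes on version B (the rewrite author's own statement) =====
-- stated objective: alternative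
-- what changed: Replaces the 4-way recursive flood fill by an iterative DFS over an explicit stack of (i, j, before) triples with running sum/count accumulators, and returns total + region-sum instead of A's total-per-call accumulation.
-- intended difference: When total != 0 and the start cell passes all guards (in bounds, unchecked, not updated, l <= |before - land[i][j]| <= r), A re-adds the caller's total once per recursive call (including skipped neighbour calls) and so returns an inflated first component, e.g. (40, 1) on the witness, while B returns (total + sum of the flooded region's populations, region count) = (12, 1), which is the intended meaning of the accumulator (the repository's caller always passes total = 0). — e.g. on check_border([[5]], [[false]], [[false]], 0, 10, 5, 7, 0, 0, 0): A returns (40, 1), B returns (12, 1)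
import Mathlib
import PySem

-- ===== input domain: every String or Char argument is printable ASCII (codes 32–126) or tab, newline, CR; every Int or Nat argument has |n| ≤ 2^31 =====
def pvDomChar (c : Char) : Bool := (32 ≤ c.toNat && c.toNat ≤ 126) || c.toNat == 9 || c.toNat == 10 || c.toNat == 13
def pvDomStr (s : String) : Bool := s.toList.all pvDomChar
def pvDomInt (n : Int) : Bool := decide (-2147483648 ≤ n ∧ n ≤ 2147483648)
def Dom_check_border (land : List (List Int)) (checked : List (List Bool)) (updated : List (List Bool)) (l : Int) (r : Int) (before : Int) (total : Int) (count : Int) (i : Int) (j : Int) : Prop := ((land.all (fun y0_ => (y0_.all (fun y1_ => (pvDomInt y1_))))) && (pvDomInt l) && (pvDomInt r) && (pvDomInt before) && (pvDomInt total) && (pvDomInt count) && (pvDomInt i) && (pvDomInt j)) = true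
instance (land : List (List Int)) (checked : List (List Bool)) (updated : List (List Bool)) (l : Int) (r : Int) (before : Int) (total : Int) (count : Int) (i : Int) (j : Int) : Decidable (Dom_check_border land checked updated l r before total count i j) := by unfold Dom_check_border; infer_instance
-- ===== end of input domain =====

-- B replaces A's 4-way recursive flood fill by an explicit-stack DFS; on inputs with
-- total ≠ 0 and an accepted start cell A's value (total re-added per recursive call) is
-- replaced by the intended total + region-sum (see D_ below).  Both Pythons mutate
-- `checked` identically; the equivalence proved here is about the RETURN value.

-- ===== PORT A =====
-- cell/cellI read m[i][j] with i, j ≥ 0 (the ports only read them under the bounds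
-- guards, where this equals Python's m[i][j]; Pre_ guarantees the entries exist).
def cell (m : List (List Bool)) (i j : Int) : Bool := (m.getD i.toNat []).getD j.toNat false
def cellI (m : List (List Int)) (i j : Int) : Int := (m.getD i.toNat []).getD j.toNat 0
-- checked[i][j] = True
def pvSet2 (m : List (List Bool)) (i j : Int) : List (List Bool) :=
  m.set i.toNat ((m.getD i.toNat []).set j.toNat true)

-- A's recursion, fuel-bounded only to make it total in Lean (the fuel chosen in
-- check_border is proved sufficient under Pre_: each accepted call marks a cell).
def aCore (land : List (List Int)) (updated : List (List Bool)) (l r : Int) :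
    Nat → List (List Bool) → Int → Int → Int → Int → Int → List (List Bool) × Int × Int
  | 0, checked, _, total, _, _, _ => (checked, total, 0)
  | f+1, checked, before, total, count, i, j =>
    if i < 0 ∨ (land.length : Int) ≤ i ∨ j < 0 ∨ ((land.headD []).length : Int) ≤ j
        ∨ cell checked i j = true ∨ cell updated i j = true then
      (checked, total, 0)
    else if ¬ (l ≤ |before - cellI land i j| ∧ |before - cellI land i j| ≤ r) then
      (checked, total, 0)
    else
      let v := cellI land i j
      let ch0 := pvSet2 checked i j
      let r4 := aCore land updated l r f ch0 v total (count+1) i (j+1)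
      let r2 := aCore land updated l r f r4.1 v total (count+1) (i+1) j
      let r3 := aCore land updated l r f r2.1 v total (count+1) i (j-1)
      let r1 := aCore land updated l r f r3.1 v total (count+1) (i-1) j
      (r1.1, total + v + r1.2.1 + r2.2.1 + r3.2.1 + r4.2.1,
        r1.2.2 + r2.2.2 + r3.2.2 + r4.2.2 + 1)

def check_border (land : List (List Int)) (checked : List (List Bool)) (updated : List (List Bool)) (l : Int) (r : Int) (before : Int) (total : Int) (count : Int) (i : Int) (j : Int) : Int × Int :=
  (aCore land updated l r ((checked.map List.length).sum + 1) checked before total count i j).2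

-- ===== PORT B =====
-- Source B's while-loop over the explicit stack; fuel-bounded only for totality
-- (5·#cells + 1 pops suffice: every accepted pop marks a cell and pushes 4).
def bLoop (land : List (List Int)) (updated : List (List Bool)) (l r : Int) :
    Nat → List (List Bool) → List (Int × Int × Int) → Int → Int → Int × Int
  | _, _, [], s, c => (s, c)
  | 0, _, _ :: _, s, c => (s, c)
  | f+1, checked, (ci, cj, b) :: rest, s, c =>
    if ci < 0 ∨ (land.length : Int) ≤ ci ∨ cj < 0 ∨ ((land.headD []).length : Int) ≤ cj then
      bLoop land updated l r f checked rest s c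
    else if cell checked ci cj = true ∨ cell updated ci cj = true then
      bLoop land updated l r f checked rest s c
    else if ¬ (l ≤ |b - cellI land ci cj| ∧ |b - cellI land ci cj| ≤ r) then
      bLoop land updated l r f checked rest s c
    else
      bLoop land updated l r f (pvSet2 checked ci cj)
        ((ci, cj+1, cellI land ci cj) :: (ci+1, cj, cellI land ci cj)
          :: (ci, cj-1, cellI land ci cj) :: (ci-1, cj, cellI land ci cj) :: rest)
        (s + cellI land ci cj) (c + 1)

def check_border_alt (land : List (List Int)) (checked : List (List Bool)) (updated : List (List Bool)) (l : Int) (r : Int) (before : Int) (total : Int) (count : Int) (i : Int) (j : Int) : Int × Int :=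
  let res := bLoop land updated l r (5 * (checked.map List.length).sum + 1) checked [(i, j, before)] 0 0
  (total + res.1, res.2)

-- ===== PRECONDITION & SPEC =====
-- `Shape land m`: m has a row for every row of land, each at least len(land[0]) wide.
def Shape {α : Type} (land : List (List Int)) (m : List (List α)) : Prop :=
  land.length ≤ m.length ∧ ∀ k, k < land.length → (land.headD []).length ≤ (m.getD k []).length

-- Pre_ excludes exactly the ragged/mismatched-shape inputs on which the Python A's
-- chained indexing raises IndexError; inputs whose shapes mismatch only OUTSIDE what
-- the call actually touches before returning at the start cell are kept by the first
-- four disjuncts, and fully well-shaped inputs by the last.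
def Pre_check_border (land : List (List Int)) (checked : List (List Bool)) (updated : List (List Bool)) (l : Int) (r : Int) (before : Int) (total : Int) (count : Int) (i : Int) (j : Int) : Prop :=
  (i < 0 ∨ (land.length : Int) ≤ i ∨ j < 0 ∨ ((land.headD []).length : Int) ≤ j)
  ∨ (i.toNat < checked.length ∧ j.toNat < (checked.getD i.toNat []).length ∧ cell checked i j = true)
  ∨ (i.toNat < checked.length ∧ j.toNat < (checked.getD i.toNat []).length
      ∧ i.toNat < updated.length ∧ j.toNat < (updated.getD i.toNat []).length
      ∧ cell updated i j = true)
  ∨ (i.toNat < checked.length ∧ j.toNat < (checked.getD i.toNat []).length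
      ∧ i.toNat < updated.length ∧ j.toNat < (updated.getD i.toNat []).length
      ∧ j.toNat < (land.getD i.toNat []).length
      ∧ ¬ (l ≤ |before - cellI land i j| ∧ |before - cellI land i j| ≤ r))
  ∨ (Shape land land ∧ Shape land checked ∧ Shape land updated)

instance (land : List (List Int)) (checked : List (List Bool)) (updated : List (List Bool)) (l : Int) (r : Int) (before : Int) (total : Int) (count : Int) (i : Int) (j : Int) : Decidable (Pre_check_border land checked updated l r before total count i j) := by unfold Pre_check_border Shape; infer_instance

def pvWitness_check_border : List (List Int) × List (List Bool) × List (List Bool) × Int × Int × Int × Int × Int × Int × Int :=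
  ([[5, 8], [1, 9]], [[false, false], [false, false]], [[false, false], [false, false]], 0, 10, 5, 0, 0, 0, 0)

-- When total ≠ 0 and the start cell passes all guards, A re-adds the caller's `total`
-- once per recursive call (including skipped neighbour calls) and returns an inflated
-- first component; B returns (total + region population sum, region size), the intended
-- meaning of the accumulator (the repository's caller always passes total = 0).
def D_check_border (land : List (List Int)) (checked : List (List Bool)) (updated : List (List Bool)) (l : Int) (r : Int) (before : Int) (total : Int) (count : Int) (i : Int) (j : Int) : Prop :=
  total ≠ 0 ∧ 0 ≤ i ∧ i.toNat < land.length ∧ 0 ≤ j ∧ j.toNat < (land.headD []).length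
  ∧ (checked.getD i.toNat []).getD j.toNat false = false
  ∧ (updated.getD i.toNat []).getD j.toNat false = false
  ∧ l ≤ |before - (land.getD i.toNat []).getD j.toNat 0|
  ∧ |before - (land.getD i.toNat []).getD j.toNat 0| ≤ r

instance (land : List (List Int)) (checked : List (List Bool)) (updated : List (List Bool)) (l : Int) (r : Int) (before : Int) (total : Int) (count : Int) (i : Int) (j : Int) : Decidable (D_check_border land checked updated l r before total count i j) := by unfold D_check_border; infer_instance

def Spec_check_border (land : List (List Int)) (checked : List (List Bool)) (updated : List (List Bool)) (l : Int) (r : Int) (before : Int) (total : Int) (count : Int) (i : Int) (j : Int) (out : Int × Int) : Prop := ¬ D_check_border land checked updated l r before total count i j → out = check_border_alt land checked updated l r before total count i j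
instance (land : List (List Int)) (checked : List (List Bool)) (updated : List (List Bool)) (l : Int) (r : Int) (before : Int) (total : Int) (count : Int) (i : Int) (j : Int) (out : Int × Int) : Decidable (Spec_check_border land checked updated l r before total count i j out) := by unfold Spec_check_border; infer_instance

def pvDiffWitness_check_border : List (List Int) × List (List Bool) × List (List Bool) × Int × Int × Int × Int × Int × Int × Int :=
  ([[5]], [[false]], [[false]], 0, 10, 5, 7, 0, 0, 0)

def pvDiffWitnessOut_check_border : (Int × Int) × (Int × Int) := ((40, 1), (12, 1))

-- ===== CLAIM (what is proved, stated in full; the proofs are below) =====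
def Claim_unchanged_check_border : Prop := ∀ (land : List (List Int)) (checked : List (List Bool)) (updated : List (List Bool)) (l : Int) (r : Int) (before : Int) (total : Int) (count : Int) (i : Int) (j : Int), Dom_check_border land checked updated l r before total count i j → Pre_check_border land checked updated l r before total count i j → Spec_check_border land checked updated l r before total count i j (check_border land checked updated l r before total count i j)
def Claim_changed_check_border : Prop := Dom_check_border (pvDiffWitness_check_border.1) (pvDiffWitness_check_border.2.1) (pvDiffWitness_check_border.2.2.1) (pvDiffWitness_check_border.2.2.2.1) (pvDiffWitness_check_border.2.2.2.2.1) (pvDiffWitness_check_border.2.2.2.2.2.1) (pvDiffWitness_check_border.2.2.2.2.2.2.1) (pvDiffWitness_check_border.2.2.2.2.2.2.2.1) (pvDiffWitness_check_border.2.2.2.2.2.2.2.2.1) (pvDiffWitness_check_border.2.2.2.2.2.2.2.2.2) ∧ Pre_check_border (pvDiffWitness_check_border.1) (pvDiffWitness_check_border.2.1) (pvDiffWitness_check_border.2.2.1) (pvDiffWitness_check_border.2.2.2.1) (pvDiffWitness_check_border.2.2.2.2.1) (pvDiffWitness_check_border.2.2.2.2.2.1) (pvDiffWitness_check_border.2.2.2.2.2.2.1)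 (pvDiffWitness_check_border.2.2.2.2.2.2.2.1) (pvDiffWitness_check_border.2.2.2.2.2.2.2.2.1) (pvDiffWitness_check_border.2.2.2.2.2.2.2.2.2) ∧ D_check_border (pvDiffWitness_check_border.1) (pvDiffWitness_check_border.2.1) (pvDiffWitness_check_border.2.2.1) (pvDiffWitness_check_border.2.2.2.1) (pvDiffWitness_check_border.2.2.2.2.1) (pvDiffWitness_check_border.2.2.2.2.2.1) (pvDiffWitness_check_border.2.2.2.2.2.2.1) (pvDiffWitness_check_border.2.2.2.2.2.2.2.1) (pvDiffWitness_check_border.2.2.2.2.2.2.2.2.1) (pvDiffWitness_check_border.2.2.2.2.2.2.2.2.2) ∧ check_border (pvDiffWitness_check_border.1) (pvDiffWitness_check_border.2.1) (pvDiffWitness_check_border.2.2.1) (pvDiffWitness_check_border.2.2.2.1) (pvDiffWitness_check_border.2.2.2.2.1) (pvDiffWitness_check_border.2.2.2.2.2.1) (pvDiffWitness_check_border.2.2.2.2.2.2.1) (pvDiffWitness_check_border.2.2.2.2.2.2.2.1) (pvDiffWitness_check_border.2.2.2.2.2.2.2.2.1) (pvDiffWitness_check_border.2.2.2.2.2.2.2.2.2)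 = pvDiffWitnessOut_check_border.1 ∧ check_border_alt (pvDiffWitness_check_border.1) (pvDiffWitness_check_border.2.1) (pvDiffWitness_check_border.2.2.1) (pvDiffWitness_check_border.2.2.2.1) (pvDiffWitness_check_border.2.2.2.2.1) (pvDiffWitness_check_border.2.2.2.2.2.1) (pvDiffWitness_check_border.2.2.2.2.2.2.1) (pvDiffWitness_check_border.2.2.2.2.2.2.2.1) (pvDiffWitness_check_border.2.2.2.2.2.2.2.2.1) (pvDiffWitness_check_border.2.2.2.2.2.2.2.2.2) = pvDiffWitnessOut_check_border.2 ∧ pvDiffWitnessOut_check_border.1 ≠ pvDiffWitnessOut_check_border.2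

def Claim_exact_check_border : Prop := ∀ (land : List (List Int)) (checked : List (List Bool)) (updated : List (List Bool)) (l : Int) (r : Int) (before : Int) (total : Int) (count : Int) (i : Int) (j : Int), Dom_check_border land checked updated l r before total count i j → Pre_check_border land checked updated l r before total count i j → D_check_border land checked updated l r before total count i j → check_border land checked updated l r before total count i j ≠ check_border_alt land checked updated l r before total count i j

-- ===== LEMMAS AND PROOFS =====

def falseCnt (m : List (List Bool)) : Nat := (m.map (fun row => row.countP (fun x => !x))).sum

theorem countP_set_true_le : ∀ (row : List Bool) (n : Nat),
    (row.set n true).countP (fun x => !x) ≤ row.countP (fun x => !x) := by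
  intro row
  induction row with
  | nil => intro n; simp
  | cons a t ih =>
    intro n
    cases n with
    | zero => cases a <;> simp [List.countP_cons]
    | succ n => simp [List.countP_cons]; exact ih n

theorem countP_set_true_eq : ∀ (row : List Bool) (n : Nat), n < row.length →
    row.getD n false = false →
    (row.set n true).countP (fun x => !x) + 1 = row.countP (fun x => !x) := by
  intro row
  induction row with
  | nil => intro n h; simp at h
  | cons a t ih =>
    intro n hn ha
    cases n with
    | zero => simp at ha; subst ha; simp [List.countP_cons]
    | succ n =>
      simp at hn ha
      simp [List.countP_cons]
      have := ih n hn ha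
      omega

theorem falseCnt_set_eq : ∀ (m : List (List Bool)) (k : Nat) (r' : List Bool), k < m.length →
    falseCnt (m.set k r') + (m.getD k []).countP (fun x => !x)
      = falseCnt m + r'.countP (fun x => !x) := by
  intro m
  induction m with
  | nil => intro k r' h; simp at h
  | cons a t ih =>
    intro k r' hk
    cases k with
    | zero => simp [falseCnt]; omega
    | succ k =>
      simp at hk
      have := ih k r' hk
      simp [falseCnt] at this ⊢
      omega

theorem falseCnt_pvSet2_le (m : List (List Bool)) (i j : Int) :
    falseCnt (pvSet2 m i j) ≤ falseCnt m := by
  by_cases h : i.toNat < m.length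
  · have := falseCnt_set_eq m i.toNat ((m.getD i.toNat []).set j.toNat true) h
    have h2 := countP_set_true_le (m.getD i.toNat []) j.toNat
    unfold pvSet2
    omega
  · unfold pvSet2
    rw [List.set_eq_of_length_le (by omega)]

theorem falseCnt_pvSet2_eq (m : List (List Bool)) (i j : Int)
    (hi : i.toNat < m.length) (hj : j.toNat < (m.getD i.toNat []).length)
    (hc : cell m i j = false) :
    falseCnt (pvSet2 m i j) + 1 = falseCnt m := by
  have h1 := falseCnt_set_eq m i.toNat ((m.getD i.toNat []).set j.toNat true) hi
  have h2 := countP_set_true_eq (m.getD i.toNat []) j.toNat hj hc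
  unfold pvSet2
  omega

theorem getD_pvSet2_length (m : List (List Bool)) (i j : Int) (k : Nat) :
    ((pvSet2 m i j).getD k []).length = ((m.getD k []).length) := by
  unfold pvSet2
  by_cases he : i.toNat = k
  · subst he
    by_cases hk : i.toNat < m.length
    · rw [List.getD_eq_getElem?_getD, List.getD_eq_getElem?_getD,
        List.getElem?_set_self hk]
      simp [List.getElem?_eq_getElem hk, List.getD_eq_getElem?_getD]
    · rw [List.set_eq_of_length_le (by omega)]
  · rw [List.getD_eq_getElem?_getD, List.getElem?_set_ne he,
      List.getD_eq_getElem?_getD]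

theorem Shape_pvSet2 {land : List (List Int)} {m : List (List Bool)} (h : Shape land m)
    (i j : Int) : Shape land (pvSet2 m i j) := by
  obtain ⟨h1, h2⟩ := h
  constructor
  · unfold pvSet2; simpa using h1
  · intro k hk
    rw [getD_pvSet2_length]
    exact h2 k hk

-- one-step equations for the two ports (skip / accept)
theorem aCore_skip1 (land : List (List Int)) (updated : List (List Bool)) (l r : Int)
    (f : Nat) (ch : List (List Bool)) (b t cnt i j : Int)
    (h : i < 0 ∨ (land.length : Int) ≤ i ∨ j < 0 ∨ ((land.headD []).length : Int) ≤ j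
        ∨ cell ch i j = true ∨ cell updated i j = true) :
    aCore land updated l r (f+1) ch b t cnt i j = (ch, t, 0) := by
  simp only [aCore]; rw [if_pos h]

theorem aCore_skip2 (land : List (List Int)) (updated : List (List Bool)) (l r : Int)
    (f : Nat) (ch : List (List Bool)) (b t cnt i j : Int)
    (h1 : ¬ (i < 0 ∨ (land.length : Int) ≤ i ∨ j < 0 ∨ ((land.headD []).length : Int) ≤ j
        ∨ cell ch i j = true ∨ cell updated i j = true))
    (h2 : ¬ (l ≤ |b - cellI land i j| ∧ |b - cellI land i j| ≤ r)) :
    aCore land updated l r (f+1) ch b t cnt i j = (ch, t, 0) := by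
  simp only [aCore]; rw [if_neg h1, if_pos h2]

theorem aCore_accept (land : List (List Int)) (updated : List (List Bool)) (l r : Int)
    (f : Nat) (ch : List (List Bool)) (b t cnt i j : Int)
    (h1 : ¬ (i < 0 ∨ (land.length : Int) ≤ i ∨ j < 0 ∨ ((land.headD []).length : Int) ≤ j
        ∨ cell ch i j = true ∨ cell updated i j = true))
    (h2 : l ≤ |b - cellI land i j| ∧ |b - cellI land i j| ≤ r) :
    aCore land updated l r (f+1) ch b t cnt i j =
      (let v := cellI land i j
       let r4 := aCore land updated l r f (pvSet2 ch i j) v t (cnt+1) i (j+1)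
       let r2 := aCore land updated l r f r4.1 v t (cnt+1) (i+1) j
       let r3 := aCore land updated l r f r2.1 v t (cnt+1) i (j-1)
       let r1 := aCore land updated l r f r3.1 v t (cnt+1) (i-1) j
       (r1.1, t + v + r1.2.1 + r2.2.1 + r3.2.1 + r4.2.1,
         r1.2.2 + r2.2.2 + r3.2.2 + r4.2.2 + 1)) := by
  simp only [aCore]; rw [if_neg h1, if_neg (not_not_intro h2)]

theorem bLoop_nil (land : List (List Int)) (updated : List (List Bool)) (l r : Int)
    (f : Nat) (ch : List (List Bool)) (s c : Int) :
    bLoop land updated l r f ch [] s c = (s, c) := by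
  cases f <;> simp [bLoop]

theorem bLoop_skip1 (land : List (List Int)) (updated : List (List Bool)) (l r : Int)
    (f : Nat) (ch : List (List Bool)) (ci cj b : Int) (rest : List (Int × Int × Int)) (s c : Int)
    (h : ci < 0 ∨ (land.length : Int) ≤ ci ∨ cj < 0 ∨ ((land.headD []).length : Int) ≤ cj) :
    bLoop land updated l r (f+1) ch ((ci, cj, b) :: rest) s c
      = bLoop land updated l r f ch rest s c := by
  simp only [bLoop]; rw [if_pos h]

theorem bLoop_skip2 (land : List (List Int)) (updated : List (List Bool)) (l r : Int)
    (f : Nat) (ch : List (List Bool)) (ci cj b : Int) (rest : List (Int × Int × Int)) (s c : Int)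
    (h1 : ¬ (ci < 0 ∨ (land.length : Int) ≤ ci ∨ cj < 0 ∨ ((land.headD []).length : Int) ≤ cj))
    (h2 : cell ch ci cj = true ∨ cell updated ci cj = true) :
    bLoop land updated l r (f+1) ch ((ci, cj, b) :: rest) s c
      = bLoop land updated l r f ch rest s c := by
  simp only [bLoop]; rw [if_neg h1, if_pos h2]

theorem bLoop_skip3 (land : List (List Int)) (updated : List (List Bool)) (l r : Int)
    (f : Nat) (ch : List (List Bool)) (ci cj b : Int) (rest : List (Int × Int × Int)) (s c : Int)
    (h1 : ¬ (ci < 0 ∨ (land.length : Int) ≤ ci ∨ cj < 0 ∨ ((land.headD []).length : Int) ≤ cj))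
    (h2 : ¬ (cell ch ci cj = true ∨ cell updated ci cj = true))
    (h3 : ¬ (l ≤ |b - cellI land ci cj| ∧ |b - cellI land ci cj| ≤ r)) :
    bLoop land updated l r (f+1) ch ((ci, cj, b) :: rest) s c
      = bLoop land updated l r f ch rest s c := by
  simp only [bLoop]; rw [if_neg h1, if_neg h2, if_pos h3]

theorem bLoop_accept (land : List (List Int)) (updated : List (List Bool)) (l r : Int)
    (f : Nat) (ch : List (List Bool)) (ci cj b : Int) (rest : List (Int × Int × Int)) (s c : Int)
    (h1 : ¬ (ci < 0 ∨ (land.length : Int) ≤ ci ∨ cj < 0 ∨ ((land.headD []).length : Int) ≤ cj))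
    (h2 : ¬ (cell ch ci cj = true ∨ cell updated ci cj = true))
    (h3 : l ≤ |b - cellI land ci cj| ∧ |b - cellI land ci cj| ≤ r) :
    bLoop land updated l r (f+1) ch ((ci, cj, b) :: rest) s c
      = bLoop land updated l r f (pvSet2 ch ci cj)
          ((ci, cj+1, cellI land ci cj) :: (ci+1, cj, cellI land ci cj)
            :: (ci, cj-1, cellI land ci cj) :: (ci-1, cj, cellI land ci cj) :: rest)
          (s + cellI land ci cj) (c + 1) := by
  simp only [bLoop]; rw [if_neg h1, if_neg h2, if_neg (not_not_intro h3)]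

theorem aCore_mono (land : List (List Int)) (updated : List (List Bool)) (l r : Int) :
    ∀ (f : Nat) (ch : List (List Bool)) (b t cnt i j : Int), Shape land ch →
      Shape land (aCore land updated l r f ch b t cnt i j).1 ∧
      falseCnt (aCore land updated l r f ch b t cnt i j).1 ≤ falseCnt ch := by
  intro f
  induction f with
  | zero => intro ch b t cnt i j h; exact ⟨h, le_refl _⟩
  | succ f ih =>
    intro ch b t cnt i j h
    by_cases g1 : (i < 0 ∨ (land.length : Int) ≤ i ∨ j < 0 ∨ ((land.headD []).length : Int) ≤ j
        ∨ cell ch i j = true ∨ cell updated i j = true)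
    · rw [aCore_skip1 land updated l r f ch b t cnt i j g1]; exact ⟨h, le_refl _⟩
    · by_cases g2 : ¬ (l ≤ |b - cellI land i j| ∧ |b - cellI land i j| ≤ r)
      · rw [aCore_skip2 land updated l r f ch b t cnt i j g1 g2]; exact ⟨h, le_refl _⟩
      · push_neg at g2
        rw [aCore_accept land updated l r f ch b t cnt i j g1 g2]
        simp only []
        have h0 : Shape land (pvSet2 ch i j) := Shape_pvSet2 h i j
        have e0 : falseCnt (pvSet2 ch i j) ≤ falseCnt ch := falseCnt_pvSet2_le ch i j
        have i4 := ih (pvSet2 ch i j) (cellI land i j) t (cnt+1) i (j+1) h0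
        have i2 := ih _ (cellI land i j) t (cnt+1) (i+1) j i4.1
        have i3 := ih _ (cellI land i j) t (cnt+1) i (j-1) i2.1
        have i1 := ih _ (cellI land i j) t (cnt+1) (i-1) j i3.1
        exact ⟨i1.1, by omega⟩

theorem bLoop_stable (land : List (List Int)) (updated : List (List Bool)) (l r : Int) :
    ∀ (n f₁ f₂ : Nat) (ch : List (List Bool)) (stack : List (Int × Int × Int)) (s c : Int),
      Shape land ch → stack.length + 5 * falseCnt ch ≤ n → n ≤ f₁ → n ≤ f₂ →
      bLoop land updated l r f₁ ch stack s c = bLoop land updated l r f₂ ch stack s c := by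
  intro n
  induction n with
  | zero =>
    intro f₁ f₂ ch stack s c _ hm _ _
    have : stack = [] := by cases stack <;> simp_all
    subst this
    rw [bLoop_nil, bLoop_nil]
  | succ n ih =>
    intro f₁ f₂ ch stack s c hsh hm h1 h2
    cases stack with
    | nil => rw [bLoop_nil, bLoop_nil]
    | cons hd rest =>
      obtain ⟨ci, cj, b⟩ := hd
      obtain ⟨f₁', rfl⟩ : ∃ k, f₁ = k + 1 := ⟨f₁ - 1, by omega⟩
      obtain ⟨f₂', rfl⟩ : ∃ k, f₂ = k + 1 := ⟨f₂ - 1, by omega⟩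
      simp only [List.length_cons] at hm
      by_cases g1 : (ci < 0 ∨ (land.length : Int) ≤ ci ∨ cj < 0 ∨ ((land.headD []).length : Int) ≤ cj)
      · rw [bLoop_skip1 land updated l r f₁' ch ci cj b rest s c g1,
          bLoop_skip1 land updated l r f₂' ch ci cj b rest s c g1]
        exact ih f₁' f₂' ch rest s c hsh (by omega) (by omega) (by omega)
      · by_cases g2 : (cell ch ci cj = true ∨ cell updated ci cj = true)
        · rw [bLoop_skip2 land updated l r f₁' ch ci cj b rest s c g1 g2,
            bLoop_skip2 land updated l r f₂' ch ci cj b rest s c g1 g2]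
          exact ih f₁' f₂' ch rest s c hsh (by omega) (by omega) (by omega)
        · by_cases g3 : ¬ (l ≤ |b - cellI land ci cj| ∧ |b - cellI land ci cj| ≤ r)
          · rw [bLoop_skip3 land updated l r f₁' ch ci cj b rest s c g1 g2 g3,
              bLoop_skip3 land updated l r f₂' ch ci cj b rest s c g1 g2 g3]
            exact ih f₁' f₂' ch rest s c hsh (by omega) (by omega) (by omega)
          · push_neg at g3
            rw [bLoop_accept land updated l r f₁' ch ci cj b rest s c g1 g2 g3,
              bLoop_accept land updated l r f₂' ch ci cj b rest s c g1 g2 g3]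
            have hg1 := g1
            have hg2 := g2
            push_neg at hg1 hg2
            have hci : ci.toNat < ch.length := by have := hsh.1; omega
            have hcj : cj.toNat < (ch.getD ci.toNat []).length := by
              have := hsh.2 ci.toNat (by omega); omega
            have hfe := falseCnt_pvSet2_eq ch ci cj hci hcj (by simpa using hg2.1)
            exact ih f₁' f₂' (pvSet2 ch ci cj) _ _ _ (Shape_pvSet2 hsh ci cj)
              (by simp only [List.length_cons]; omega) (by omega) (by omega)

-- the correspondence: one recursive call of A (with total = 0) = processing its
-- stack entry in B
theorem bmain (land : List (List Int)) (updated : List (List Bool)) (l r : Int) :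
    ∀ (fA : Nat) (ch : List (List Bool)) (i j b cnt : Int)
      (rest : List (Int × Int × Int)) (s c : Int) (fB fB' : Nat),
      Shape land ch → falseCnt ch < fA →
      rest.length + 1 + 5 * falseCnt ch ≤ fB →
      rest.length + 5 * falseCnt (aCore land updated l r fA ch b 0 cnt i j).1 ≤ fB' →
      bLoop land updated l r fB ch ((i, j, b) :: rest) s c
        = bLoop land updated l r fB' (aCore land updated l r fA ch b 0 cnt i j).1 rest
            (s + (aCore land updated l r fA ch b 0 cnt i j).2.1)
            (c + (aCore land updated l r fA ch b 0 cnt i j).2.2) := by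
  intro fA
  induction fA with
  | zero => intro ch i j b cnt rest s c fB fB' _ hlt _ _; omega
  | succ fA ih =>
    intro ch i j b cnt rest s c fB fB' hsh hlt hfB hfB'
    obtain ⟨fB'', rfl⟩ : ∃ k, fB = k + 1 := ⟨fB - 1, by omega⟩
    by_cases g1 : (i < 0 ∨ (land.length : Int) ≤ i ∨ j < 0 ∨ ((land.headD []).length : Int) ≤ j)
    · have hg6 : (i < 0 ∨ (land.length : Int) ≤ i ∨ j < 0 ∨ ((land.headD []).length : Int) ≤ j
          ∨ cell ch i j = true ∨ cell updated i j = true) := by tauto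
      rw [aCore_skip1 land updated l r fA ch b 0 cnt i j hg6] at hfB' ⊢
      rw [bLoop_skip1 land updated l r fB'' ch i j b rest s c g1]
      simp only [] at hfB'
      rw [bLoop_stable land updated l r (rest.length + 5 * falseCnt ch) fB'' fB' ch rest s c
        hsh (le_refl _) (by omega) (by omega)]
      simp
    · by_cases g2 : (cell ch i j = true ∨ cell updated i j = true)
      · have hg6 : (i < 0 ∨ (land.length : Int) ≤ i ∨ j < 0 ∨ ((land.headD []).length : Int) ≤ j
            ∨ cell ch i j = true ∨ cell updated i j = true) := by tauto
        rw [aCore_skip1 land updated l r fA ch b 0 cnt i j hg6] at hfB' ⊢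
        rw [bLoop_skip2 land updated l r fB'' ch i j b rest s c g1 g2]
        simp only [] at hfB'
        rw [bLoop_stable land updated l r (rest.length + 5 * falseCnt ch) fB'' fB' ch rest s c
          hsh (le_refl _) (by omega) (by omega)]
        simp
      · have hg6 : ¬ (i < 0 ∨ (land.length : Int) ≤ i ∨ j < 0 ∨ ((land.headD []).length : Int) ≤ j
            ∨ cell ch i j = true ∨ cell updated i j = true) := by tauto
        by_cases g3 : ¬ (l ≤ |b - cellI land i j| ∧ |b - cellI land i j| ≤ r)
        · rw [aCore_skip2 land updated l r fA ch b 0 cnt i j hg6 g3] at hfB' ⊢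
          rw [bLoop_skip3 land updated l r fB'' ch i j b rest s c g1 g2 g3]
          simp only [] at hfB'
          rw [bLoop_stable land updated l r (rest.length + 5 * falseCnt ch) fB'' fB' ch rest s c
            hsh (le_refl _) (by omega) (by omega)]
          simp
        · push_neg at g3
          -- accepted start cell
          have hg1 := g1
          have hg2 := g2
          push_neg at hg1 hg2
          have hci : i.toNat < ch.length := by have := hsh.1; omega
          have hcj : j.toNat < (ch.getD i.toNat []).length := by
            have := hsh.2 i.toNat (by omega); omega
          have hfe := falseCnt_pvSet2_eq ch i j hci hcj (by simpa using hg2.1)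
          have hsh0 : Shape land (pvSet2 ch i j) := Shape_pvSet2 hsh i j
          obtain ⟨⟨ch4, t4, c4⟩, he4⟩ :
              ∃ p, aCore land updated l r fA (pvSet2 ch i j) (cellI land i j) 0 (cnt+1) i (j+1) = p :=
            ⟨_, rfl⟩
          have he4f : (aCore land updated l r fA (pvSet2 ch i j) (cellI land i j) 0 (cnt+1) i (j+1)).1 = ch4 := by rw [he4]
          have he4t : (aCore land updated l r fA (pvSet2 ch i j) (cellI land i j) 0 (cnt+1) i (j+1)).2.1 = t4 := by rw [he4]
          have he4c : (aCore land updated l r fA (pvSet2 ch i j) (cellI land i j) 0 (cnt+1) i (j+1)).2.2 = c4 := by rw [he4]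
          obtain ⟨⟨ch2, t2, c2⟩, he2⟩ :
              ∃ p, aCore land updated l r fA ch4 (cellI land i j) 0 (cnt+1) (i+1) j = p :=
            ⟨_, rfl⟩
          have he2f : (aCore land updated l r fA ch4 (cellI land i j) 0 (cnt+1) (i+1) j).1 = ch2 := by rw [he2]
          have he2t : (aCore land updated l r fA ch4 (cellI land i j) 0 (cnt+1) (i+1) j).2.1 = t2 := by rw [he2]
          have he2c : (aCore land updated l r fA ch4 (cellI land i j) 0 (cnt+1) (i+1) j).2.2 = c2 := by rw [he2]
          obtain ⟨⟨ch3, t3, c3⟩, he3⟩ :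
              ∃ p, aCore land updated l r fA ch2 (cellI land i j) 0 (cnt+1) i (j-1) = p :=
            ⟨_, rfl⟩
          have he3f : (aCore land updated l r fA ch2 (cellI land i j) 0 (cnt+1) i (j-1)).1 = ch3 := by rw [he3]
          have he3t : (aCore land updated l r fA ch2 (cellI land i j) 0 (cnt+1) i (j-1)).2.1 = t3 := by rw [he3]
          have he3c : (aCore land updated l r fA ch2 (cellI land i j) 0 (cnt+1) i (j-1)).2.2 = c3 := by rw [he3]
          obtain ⟨⟨ch1, t1, c1⟩, he1⟩ :
              ∃ p, aCore land updated l r fA ch3 (cellI land i j) 0 (cnt+1) (i-1) j = p :=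
            ⟨_, rfl⟩
          have he1f : (aCore land updated l r fA ch3 (cellI land i j) 0 (cnt+1) (i-1) j).1 = ch1 := by rw [he1]
          have he1t : (aCore land updated l r fA ch3 (cellI land i j) 0 (cnt+1) (i-1) j).2.1 = t1 := by rw [he1]
          have he1c : (aCore land updated l r fA ch3 (cellI land i j) 0 (cnt+1) (i-1) j).2.2 = c1 := by rw [he1]
          have m4 := aCore_mono land updated l r fA (pvSet2 ch i j) (cellI land i j) 0 (cnt+1) i (j+1) hsh0
          rw [he4f] at m4
          have m2 := aCore_mono land updated l r fA ch4 (cellI land i j) 0 (cnt+1) (i+1) j m4.1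
          rw [he2f] at m2
          have m3 := aCore_mono land updated l r fA ch2 (cellI land i j) 0 (cnt+1) i (j-1) m2.1
          rw [he3f] at m3
          have m1 := aCore_mono land updated l r fA ch3 (cellI land i j) 0 (cnt+1) (i-1) j m3.1
          rw [he1f] at m1
          have hA : aCore land updated l r (fA+1) ch b 0 cnt i j
              = (ch1, 0 + cellI land i j + t1 + t2 + t3 + t4, c1 + c2 + c3 + c4 + 1) := by
            rw [aCore_accept land updated l r fA ch b 0 cnt i j hg6 g3]
            simp only [he4, he2, he3, he1]
          rw [hA] at hfB' ⊢
          simp only [] at hfB'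
          rw [bLoop_accept land updated l r fB'' ch i j b rest s c g1 g2 g3]
          rw [ih (pvSet2 ch i j) i (j+1) (cellI land i j) (cnt+1)
              ((i+1, j, cellI land i j) :: (i, j-1, cellI land i j) :: (i-1, j, cellI land i j) :: rest)
              (s + cellI land i j) (c + 1) fB''
              ((3 + rest.length) + 5 * falseCnt ch4)
              hsh0 (by omega)
              (by simp only [List.length_cons]; omega)
              (by rw [he4f]; simp only [List.length_cons]; omega)]
          rw [he4f, he4t, he4c]
          rw [ih ch4 (i+1) j (cellI land i j) (cnt+1)
              ((i, j-1, cellI land i j) :: (i-1, j, cellI land i j) :: rest)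
              (s + cellI land i j + t4) (c + 1 + c4)
              ((3 + rest.length) + 5 * falseCnt ch4)
              ((2 + rest.length) + 5 * falseCnt ch2)
              m4.1 (by omega)
              (by simp only [List.length_cons]; omega)
              (by rw [he2f]; simp only [List.length_cons]; omega)]
          rw [he2f, he2t, he2c]
          rw [ih ch2 i (j-1) (cellI land i j) (cnt+1)
              ((i-1, j, cellI land i j) :: rest)
              (s + cellI land i j + t4 + t2) (c + 1 + c4 + c2)
              ((2 + rest.length) + 5 * falseCnt ch2)
              ((1 + rest.length) + 5 * falseCnt ch3)
              m2.1 (by omega)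
              (by simp only [List.length_cons]; omega)
              (by rw [he3f]; simp only [List.length_cons]; omega)]
          rw [he3f, he3t, he3c]
          rw [ih ch3 (i-1) j (cellI land i j) (cnt+1)
              rest (s + cellI land i j + t4 + t2 + t3) (c + 1 + c4 + c2 + c3)
              ((1 + rest.length) + 5 * falseCnt ch3) fB'
              m3.1 (by omega)
              (by omega)
              (by rw [he1f]; omega)]
          rw [he1f, he1t, he1c]
          have hs : s + cellI land i j + t4 + t2 + t3 + t1
              = s + (0 + cellI land i j + t1 + t2 + t3 + t4) := by ring
          have hc : c + 1 + c4 + c2 + c3 + c1 = c + (c1 + c2 + c3 + c4 + 1) := by ring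
          rw [hs, hc]

theorem falseCnt_le_sum (m : List (List Bool)) : falseCnt m ≤ (m.map List.length).sum := by
  induction m with
  | nil => simp [falseCnt]
  | cons a t ih =>
    simp [falseCnt] at ih ⊢
    have := List.countP_le_length (p := fun x => !x) (l := a)
    omega


-- A's returned total is linear in the caller's `total`: total·m + (value at total = 0),
-- with m ≥ 2 as soon as the start cell is accepted
theorem aCore_lin (land : List (List Int)) (updated : List (List Bool)) (l r : Int) :
    ∀ (f : Nat) (ch : List (List Bool)) (b t cnt i j : Int),
      ∃ m : Nat, 1 ≤ m ∧
        (aCore land updated l r f ch b t cnt i j).1 = (aCore land updated l r f ch b 0 cnt i j).1 ∧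
        (aCore land updated l r f ch b t cnt i j).2.1
          = t * m + (aCore land updated l r f ch b 0 cnt i j).2.1 ∧
        (aCore land updated l r f ch b t cnt i j).2.2 = (aCore land updated l r f ch b 0 cnt i j).2.2 ∧
        ((¬ (i < 0 ∨ (land.length : Int) ≤ i ∨ j < 0 ∨ ((land.headD []).length : Int) ≤ j
              ∨ cell ch i j = true ∨ cell updated i j = true)
          ∧ (l ≤ |b - cellI land i j| ∧ |b - cellI land i j| ≤ r) ∧ 1 ≤ f) → 2 ≤ m) := by
  intro f
  induction f with
  | zero =>
    intro ch b t cnt i j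
    exact ⟨1, le_refl _, rfl, by simp [aCore], rfl, by omega⟩
  | succ f ih =>
    intro ch b t cnt i j
    by_cases g1 : (i < 0 ∨ (land.length : Int) ≤ i ∨ j < 0 ∨ ((land.headD []).length : Int) ≤ j
        ∨ cell ch i j = true ∨ cell updated i j = true)
    · refine ⟨1, le_refl _, ?_, ?_, ?_, ?_⟩
      · rw [aCore_skip1 land updated l r f ch b t cnt i j g1,
          aCore_skip1 land updated l r f ch b 0 cnt i j g1]
      · rw [aCore_skip1 land updated l r f ch b t cnt i j g1,
          aCore_skip1 land updated l r f ch b 0 cnt i j g1]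
        simp
      · rw [aCore_skip1 land updated l r f ch b t cnt i j g1,
          aCore_skip1 land updated l r f ch b 0 cnt i j g1]
      · intro hx; exact absurd g1 hx.1
    · by_cases g2 : ¬ (l ≤ |b - cellI land i j| ∧ |b - cellI land i j| ≤ r)
      · refine ⟨1, le_refl _, ?_, ?_, ?_, ?_⟩
        · rw [aCore_skip2 land updated l r f ch b t cnt i j g1 g2,
            aCore_skip2 land updated l r f ch b 0 cnt i j g1 g2]
        · rw [aCore_skip2 land updated l r f ch b t cnt i j g1 g2,
            aCore_skip2 land updated l r f ch b 0 cnt i j g1 g2]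
          simp
        · rw [aCore_skip2 land updated l r f ch b t cnt i j g1 g2,
            aCore_skip2 land updated l r f ch b 0 cnt i j g1 g2]
        · intro hx; exact absurd hx.2.1 g2
      · push_neg at g2
        obtain ⟨m4, hm4, h4f, h4t, h4c⟩ := ih (pvSet2 ch i j) (cellI land i j) t (cnt+1) i (j+1)
        obtain ⟨m2, hm2, h2f, h2t, h2c⟩ :=
          ih ((aCore land updated l r f (pvSet2 ch i j) (cellI land i j) 0 (cnt+1) i (j+1)).1)
            (cellI land i j) t (cnt+1) (i+1) j
        obtain ⟨m3, hm3, h3f, h3t, h3c⟩ :=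
          ih ((aCore land updated l r f
                (aCore land updated l r f (pvSet2 ch i j) (cellI land i j) 0 (cnt+1) i (j+1)).1
                (cellI land i j) 0 (cnt+1) (i+1) j).1)
            (cellI land i j) t (cnt+1) i (j-1)
        obtain ⟨m1, hm1, h1f, h1t, h1c⟩ :=
          ih ((aCore land updated l r f
                (aCore land updated l r f
                  (aCore land updated l r f (pvSet2 ch i j) (cellI land i j) 0 (cnt+1) i (j+1)).1
                  (cellI land i j) 0 (cnt+1) (i+1) j).1
                (cellI land i j) 0 (cnt+1) i (j-1)).1)
            (cellI land i j) t (cnt+1) (i-1) j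
        refine ⟨m1 + m2 + m3 + m4 + 1, by omega, ?_, ?_, ?_, fun _ => by omega⟩
        · rw [aCore_accept land updated l r f ch b t cnt i j g1 g2,
            aCore_accept land updated l r f ch b 0 cnt i j g1 g2]
          simp only [h4f, h2f, h3f, h1f]
        · rw [aCore_accept land updated l r f ch b t cnt i j g1 g2,
            aCore_accept land updated l r f ch b 0 cnt i j g1 g2]
          simp only [h4f, h2f, h3f, h1f, h4t, h2t, h3t, h1t]
          push_cast
          ring
        · rw [aCore_accept land updated l r f ch b t cnt i j g1 g2,
            aCore_accept land updated l r f ch b 0 cnt i j g1 g2]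
          simp only [h4f, h2f, h3f, h1f, h4c, h2c, h3c, h1c]

-- ===== VERDICT (by name: the statement is the Claim_ definition above) =====
theorem check_border_spec : Claim_unchanged_check_border := by
  intro land checked updated l r before total count i j _hdom hpre
  unfold Spec_check_border
  intro hD
  by_cases g1 : (i < 0 ∨ (land.length : Int) ≤ i ∨ j < 0 ∨ ((land.headD []).length : Int) ≤ j)
  · -- start out of bounds: both return (total, 0)
    unfold check_border check_border_alt
    rw [aCore_skip1 land updated l r ((checked.map List.length).sum) checked before total count i j
        (by tauto),
      bLoop_skip1 land updated l r (5 * (checked.map List.length).sum) checked i j before [] 0 0 g1,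
      bLoop_nil]
    simp
  · by_cases g2 : (cell checked i j = true ∨ cell updated i j = true)
    · unfold check_border check_border_alt
      rw [aCore_skip1 land updated l r ((checked.map List.length).sum) checked before total count i j
          (by tauto),
        bLoop_skip2 land updated l r (5 * (checked.map List.length).sum) checked i j before [] 0 0 g1 g2,
        bLoop_nil]
      simp
    · have hg6 : ¬ (i < 0 ∨ (land.length : Int) ≤ i ∨ j < 0 ∨ ((land.headD []).length : Int) ≤ j
          ∨ cell checked i j = true ∨ cell updated i j = true) := by tauto
      by_cases g3 : ¬ (l ≤ |before - cellI land i j| ∧ |before - cellI land i j| ≤ r)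
      · unfold check_border check_border_alt
        rw [aCore_skip2 land updated l r ((checked.map List.length).sum) checked before total count i j
            hg6 g3,
          bLoop_skip3 land updated l r (5 * (checked.map List.length).sum) checked i j before [] 0 0 g1 g2 g3,
          bLoop_nil]
        simp
      · -- start accepted: ¬D forces total = 0, and Pre_ forces well-formed shapes
        push_neg at g3
        have htot : total = 0 := by
          unfold D_check_border at hD
          have hg1 := g1
          have hg2 := g2
          push_neg at hg1 hg2
          by_contra h
          refine hD ⟨h, by omega, by omega, by omega, by omega, ?_, ?_, ?_, ?_⟩
          · simpa [cell] using hg2.1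
          · simpa [cell] using hg2.2
          · simpa [cellI] using g3.1
          · simpa [cellI] using g3.2
        subst htot
        have hsh : Shape land checked ∧ Shape land updated := by
          unfold Pre_check_border at hpre
          have hg1 := g1
          have hg2 := g2
          push_neg at hg1 hg2
          rcases hpre with h | h | h | h | h
          · exact absurd h g1
          · exact absurd h.2.2 (by simp [hg2.1])
          · exact absurd h.2.2.2.2 (by simp [hg2.2])
          · exact absurd h.2.2.2.2.2 (by tauto)
          · exact ⟨h.2.1, h.2.2⟩
        unfold check_border check_border_alt
        have hlt : falseCnt checked < (checked.map List.length).sum + 1 := by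
          have := falseCnt_le_sum checked; omega
        have hmono := aCore_mono land updated l r ((checked.map List.length).sum + 1)
          checked before 0 count i j hsh.1
        have hfs := falseCnt_le_sum checked
        rw [bmain land updated l r ((checked.map List.length).sum + 1) checked i j before count
          [] 0 0 (5 * (checked.map List.length).sum + 1)
          (5 * (checked.map List.length).sum)
          hsh.1 hlt (by simp only [List.length_nil]; omega) (by simp only [List.length_nil]; omega)]
        rw [bLoop_nil]
        simp

theorem check_border_changed : Claim_changed_check_border := by
  unfold Claim_changed_check_border; decide

theorem check_border_tight : Claim_exact_check_border := by
  intro land checked updated l r before total count i j _hdom hpre hD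
  obtain ⟨hDt, hDi0, hDil, hDj0, hDjl, hDc, hDu, hDl, hDr⟩ := hD
  have hcC : cell checked i j = false := hDc
  have hcU : cell updated i j = false := hDu
  have g1 : ¬ (i < 0 ∨ (land.length : Int) ≤ i ∨ j < 0 ∨ ((land.headD []).length : Int) ≤ j) := by
    push_neg; omega
  have g2 : ¬ (cell checked i j = true ∨ cell updated i j = true) := by
    simp [hcC, hcU]
  have hg6 : ¬ (i < 0 ∨ (land.length : Int) ≤ i ∨ j < 0 ∨ ((land.headD []).length : Int) ≤ j
      ∨ cell checked i j = true ∨ cell updated i j = true) := by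
    push_neg
    exact ⟨by omega, by omega, by omega, by omega, by simp [hcC], by simp [hcU]⟩
  have g3 : l ≤ |before - cellI land i j| ∧ |before - cellI land i j| ≤ r := ⟨hDl, hDr⟩
  have hsh : Shape land checked ∧ Shape land updated := by
    unfold Pre_check_border at hpre
    rcases hpre with h | h | h | h | h
    · exact absurd h g1
    · exact absurd h.2.2 (by simp [hcC])
    · exact absurd h.2.2.2.2 (by simp [hcU])
    · exact absurd h.2.2.2.2.2 (by tauto)
    · exact ⟨h.2.1, h.2.2⟩
  unfold check_border check_border_alt
  have hlt : falseCnt checked < (checked.map List.length).sum + 1 := by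
    have := falseCnt_le_sum checked; omega
  have hfs := falseCnt_le_sum checked
  have hmono := aCore_mono land updated l r ((checked.map List.length).sum + 1)
    checked before 0 count i j hsh.1
  rw [bmain land updated l r ((checked.map List.length).sum + 1) checked i j before count
    [] 0 0 (5 * (checked.map List.length).sum + 1)
    (5 * (checked.map List.length).sum)
    hsh.1 hlt (by simp only [List.length_nil]; omega) (by simp only [List.length_nil]; omega)]
  rw [bLoop_nil]
  obtain ⟨m, hm1, hmf, hmt, hmc, hm2⟩ :=
    aCore_lin land updated l r ((checked.map List.length).sum + 1) checked before total count i j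
  have hm5 : 2 ≤ m := hm2 ⟨hg6, g3, by omega⟩
  intro h
  have h1 := congrArg Prod.fst h
  simp only [] at h1
  rw [hmt] at h1
  have h2 : total * ((m : Int) - 1) = 0 := by push_cast at h1 ⊢; linarith
  rcases mul_eq_zero.1 h2 with h3 | h3
  · exact hDt h3
  · have : (m : Int) = 1 := by linarith
    have : m = 1 := by exact_mod_cast this
    omega
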